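-- pv_equiv track=rewrite | github.com/jakdot/BasicProbabilityProgramming2018-2019 | weekly_tasks/week2/in class/inclass2-answers.py | check_rank
-- ===== SOURCE A (Python) =====
-- def check_rank(hand):
--     #the following line keeps only information about ranks in hand
--     hand_ranks = [i[0] if len(i) == 2 else i[:2] for i in hand]
--     #if statement is there to keep two letters in case of '10'
--     count_rank = {}
--     for i in hand_ranks:
--         if i in count_rank:
--             count_rank[i] += 1 #increase count if the rank is present
--         else:
--             count_rank[i] = 1 #start count if the rank is not yet present
--     return count_rank
-- ===== SOURCE B (Python) =====
-- def check_rank(hand):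
--     #the following line keeps only information about ranks in hand
--     hand_ranks = [i[0] if len(i) == 2 else i[:2] for i in hand]
--     #partition counting: repeatedly take the first remaining rank, count it as the
--     #number of elements the filtering pass removes, and continue on the filtered rest
--     count_rank = {}
--     ranks = hand_ranks
--     while ranks:
--         r = ranks[0]
--         rest = [x for x in ranks if x != r]
--         count_rank[r] = len(ranks) - len(rest)
--         ranks = rest
--     return count_rank
-- ===== Notes on version B (the rewrite author's own statement) =====
-- stated objective: alternative
-- what changed: Replaces the per-element get-or-init dict counting loop with partition counting: repeatedly take the first remaining rank, obtain its count as the length drop of a filtering pass that removes all its occurrences, and continue on the filtered remainder.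
import Mathlib
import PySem

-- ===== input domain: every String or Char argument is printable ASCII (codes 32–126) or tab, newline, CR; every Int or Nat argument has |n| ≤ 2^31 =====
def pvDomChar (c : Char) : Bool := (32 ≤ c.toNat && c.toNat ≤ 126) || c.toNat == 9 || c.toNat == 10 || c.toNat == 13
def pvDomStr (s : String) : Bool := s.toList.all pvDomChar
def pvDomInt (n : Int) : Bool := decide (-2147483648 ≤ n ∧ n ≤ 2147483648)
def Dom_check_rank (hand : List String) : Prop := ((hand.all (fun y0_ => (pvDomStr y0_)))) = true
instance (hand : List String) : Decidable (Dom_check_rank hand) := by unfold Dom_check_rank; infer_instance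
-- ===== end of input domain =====

-- B replaces A's get-or-init dict counting loop by partition counting: take the first
-- remaining rank, read its count off the length drop of a filtering pass, recurse on the
-- rest (objective: alternative).

-- shared helper: the rank-extraction comprehension element 'i[0] if len(i) == 2 else i[:2]'
-- (identical in both Pythons; i[0] never raises under the len == 2 guard, so the Option
-- from pyGet? is discharged with a default that is never used)
def rankOf (i : String) : String :=
  if PySem.Str.len i = 2 then
    (match PySem.Str.pyGet? i 0 with
     | some c => String.ofList [c]
     | none => "")
  else PySem.Str.slice i none (some 2)

-- ===== PORT A =====
def check_rank (hand : List String) : List (String × Int) :=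
  let hand_ranks := hand.map rankOf
  let count_rank : PySem.Dict String Int :=
    hand_ranks.foldl (fun d i =>
      if d.contains i then d.insert i (d.getD i 0 + 1)  -- count_rank[i] += 1
      else d.insert i 1) PySem.Dict.empty
  count_rank.items

-- ===== PORT B =====
-- the while loop of Source B: each iteration handles the first remaining rank r, whose count
-- is len(ranks) - len(rest); every key written is absent from the dict so far (r was just
-- filtered out of 'rest'), so 'count_rank[r] = …' appends (r, …) to the association list
def partitionCount : List String → List (String × Int)
  | [] => []
  | r :: t =>
    let rest := (r :: t).filter (fun x => x != r)   -- [x for x in ranks if x != r]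
    (r, ((r :: t).length : Int) - (rest.length : Int)) :: partitionCount rest
termination_by l => l.length
decreasing_by
  simp only [List.filter_cons, bne_self_eq_false, List.length_cons]
  exact Nat.lt_succ_of_le (List.length_filter_le _ _)

def check_rank_alt (hand : List String) : List (String × Int) :=
  let hand_ranks := hand.map rankOf
  partitionCount hand_ranks

-- ===== PRECONDITION & SPEC =====
def Spec_check_rank (hand : List String) (out : List (String × Int)) : Prop := out = check_rank_alt hand
instance (hand : List String) (out : List (String × Int)) : Decidable (Spec_check_rank hand out) := by unfold Spec_check_rank; infer_instance

-- ===== CLAIM (what is proved, stated in full; the proofs are below) =====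
def Claim_equal_check_rank : Prop := ∀ (hand : List String), Dom_check_rank hand → Spec_check_rank hand (check_rank hand)

-- ===== LEMMAS AND PROOFS =====

-- A's get-or-init step is exactly the counter step (in the else branch the missing key reads as 0)
theorem step_eq (d : PySem.Dict String Int) (i : String) :
    (if d.contains i then d.insert i (d.getD i 0 + 1) else d.insert i 1)
      = d.insert i (d.getD i 0 + 1) := by
  by_cases h : d.contains i = true
  · simp [h]
  · simp only [Bool.not_eq_true] at h
    rw [if_neg (by simp [h]), PySem.Dict.getD_of_not_contains d 0 h]
    norm_num

-- PySem.Set.ofList commutes with filter (used to relate B's filtered remainder to discard)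
theorem ofList_filter (p : String → Bool) (l : List String) :
    PySem.Set.ofList (l.filter p) = (PySem.Set.ofList l).filter p := by
  induction l with
  | nil => simp [PySem.Set.ofList_nil]
  | cons x xs ih =>
    rw [List.filter_cons]
    by_cases hx : p x = true
    · rw [if_pos hx, PySem.Set.ofList_cons, PySem.Set.ofList_cons, List.filter_cons,
        if_pos hx, ih, PySem.Set.discard, PySem.Set.discard, List.filter_filter,
        List.filter_filter]
      congr 1
      exact List.filter_congr (fun y _ => by rw [Bool.and_comm])
    · rw [if_neg hx, PySem.Set.ofList_cons, List.filter_cons,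
        if_neg hx, ih, PySem.Set.discard, List.filter_filter]
      exact List.filter_congr (fun y _ => by
        by_cases hy : y = x
        · subst hy; simp [hx]
        · simp [hy])

-- dropping all copies of r loses exactly (count r) elements
theorem length_filter_ne_add_count (t : List String) (r : String) :
    (t.filter (fun x => x != r)).length + t.count r = t.length := by
  induction t with
  | nil => simp
  | cons a t ih =>
    by_cases h : a = r
    · subst h
      simp only [List.filter_cons, bne_self_eq_false, Bool.false_eq_true, if_false,
        List.count_cons_self, List.length_cons]
      omega
    · rw [List.filter_cons, if_pos (by simp [h]), List.count_cons_of_ne (by exact h)]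
      simp only [List.length_cons]
      omega

-- B's partition recursion computes exactly the (first-occurrence, count) table
theorem partitionCount_eq (xs : List String) :
    partitionCount xs = (PySem.Set.ofList xs).map (fun k => (k, (xs.count k : Int))) := by
  induction hn : xs.length using Nat.strong_induction_on generalizing xs with
  | _ n ih =>
    match xs with
    | [] => simp [partitionCount, PySem.Set.ofList_nil]
    | r :: t =>
      rw [partitionCount]
      simp only [List.filter_cons, bne_self_eq_false, Bool.false_eq_true, if_false]
      have hlt : (t.filter (fun x => x != r)).length < n := by
        subst hn
        exact Nat.lt_succ_of_le (List.length_filter_le _ _)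
      rw [ih _ hlt _ rfl]
      rw [PySem.Set.ofList_cons, ofList_filter, List.map_cons]
      congr 1
      · have := length_filter_ne_add_count t r
        simp only [List.length_cons, List.count_cons_self]
        congr 1
        omega
      · rw [PySem.Set.discard]
        refine List.map_congr_left (fun k hk => ?_)
        have hkr : k ≠ r := by
          have := List.of_mem_filter hk
          simpa using this
        have hc : (t.filter (fun x => x != r)).count k = t.count k :=
          List.count_filter (by simp [hkr])
        rw [hc]
        simp [List.count_cons]
        exact fun e => hkr e.symm

-- ===== VERDICT (by name: the statement is the Claim_ definition above) =====
theorem check_rank_spec : Claim_equal_check_rank := by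
  intro hand _
  unfold Spec_check_rank check_rank check_rank_alt
  have hfold : (hand.map rankOf).foldl (fun d i =>
      if d.contains i then d.insert i (d.getD i 0 + 1) else d.insert i 1) PySem.Dict.empty
      = PySem.Dict.counter (hand.map rankOf) := by
    rw [PySem.List.foldl_congr_mem (hand.map rankOf) _
        (fun d (i : String) => d.insert i (d.getD i 0 + 1)) PySem.Dict.empty
        (fun acc x _ => step_eq acc x)]
    exact PySem.Dict.foldl_insert_getD_add_one_eq_counter (hand.map rankOf)
  simp only [hfold, PySem.Dict.items_counter, partitionCount_eq]
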